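-- pv_equiv track=rewrite | github.com/Inter-Knot-Arena/Inter-Knot-Arena-OCR_Scan | roster_taxonomy.py | _extract_focus_note_values
-- ===== SOURCE A (Python) =====
-- from typing import Dict, Iterable, List
--
-- def _extract_focus_note_values(note: str) -> List[str]:
--     text = str(note or "")
--     if "focus=" not in text:
--         return []
--     value = text.split("focus=", 1)[1].split(";", 1)[0].strip()
--     if not value:
--         return []
--     raw_values = [value]
--     for separator in (",", "|", "/"):
--         exploded: List[str] = []
--         for item in raw_values:
--             exploded.extend(part.strip() for part in item.split(separator))
--         raw_values = exploded
--     return [item for item in raw_values if item]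
-- ===== SOURCE B (Python) =====
-- from typing import List
--
-- def _extract_focus_note_values(note: str) -> List[str]:
--     text = str(note or "")
--     if "focus=" not in text:
--         return []
--     value = text.split("focus=", 1)[1].split(";", 1)[0].strip()
--     if not value:
--         return []
--     # one pass over value: cut at any of , | / and strip each piece as it closes
--     tokens: List[str] = []
--     cur: List[str] = []
--     for ch in value:
--         if ch in ",|/":
--             tokens.append("".join(cur).strip())
--             cur = []
--         else:
--             cur.append(ch)
--     tokens.append("".join(cur).strip())
--     return [t for t in tokens if t]
-- ===== Notes on version B (the rewrite author's own statement) =====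
-- stated objective: alternative
-- what changed: The three sequential split-on-one-separator passes (each rebuilding and re-stripping the whole token list) are replaced by a single left-to-right scan over the value that cuts at any of ',', '|', '/' and strips each piece once as it closes.
import Mathlib
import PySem

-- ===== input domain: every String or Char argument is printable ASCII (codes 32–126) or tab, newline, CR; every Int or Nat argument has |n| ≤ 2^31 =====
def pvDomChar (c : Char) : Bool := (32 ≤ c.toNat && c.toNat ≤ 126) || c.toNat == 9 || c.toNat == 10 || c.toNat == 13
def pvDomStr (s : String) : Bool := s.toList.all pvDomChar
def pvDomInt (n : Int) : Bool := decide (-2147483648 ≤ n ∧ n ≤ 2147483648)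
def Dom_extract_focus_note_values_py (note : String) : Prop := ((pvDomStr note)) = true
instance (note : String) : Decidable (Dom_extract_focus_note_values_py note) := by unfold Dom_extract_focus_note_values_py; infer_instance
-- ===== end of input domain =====

-- B replaces A's three sequential re-splitting passes over the token list by a single scan of the value.

-- ===== PORT A =====
-- A: guard on "focus=", take text after it up to ";", strip; then for each of ",", "|", "/"
-- re-split every current piece and strip the parts; finally drop empty pieces.
def extract_focus_note_values_py (note : String) : List String :=
  let text := note.toList
  if PySem.Chars.isIn "focus=".toList text = false then []
  else
    let after := PySem.List.pyGetD (PySem.Chars.splitOnMax text "focus=".toList 1) 1 []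
    let value := PySem.Chars.strip (PySem.List.pyGetD (PySem.Chars.splitOnMax after ";".toList 1) 0 [])
    if value.isEmpty then []
    else
      let raw0 : List (List Char) := [value]
      let raw := [(",".toList), ("|".toList), ("/".toList)].foldl
        (fun (raw_values : List (List Char)) (separator : List Char) =>
          raw_values.foldl
            (fun (exploded : List (List Char)) (item : List Char) =>
              exploded ++ (PySem.Chars.splitOn item separator).map PySem.Chars.strip)
            [])
        raw0
      (raw.filter (fun item => !item.isEmpty)).map String.ofList

-- ===== PORT B =====
-- B: identical prefix parsing, then ONE pass over value cutting at ',', '|', '/',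
-- stripping each piece as it closes; finally drop empty pieces.
def extract_focus_note_values_py_alt (note : String) : List String :=
  let text := note.toList
  if PySem.Chars.isIn "focus=".toList text = false then []
  else
    let after := PySem.List.pyGetD (PySem.Chars.splitOnMax text "focus=".toList 1) 1 []
    let value := PySem.Chars.strip (PySem.List.pyGetD (PySem.Chars.splitOnMax after ";".toList 1) 0 [])
    if value.isEmpty then []
    else
      let st := value.foldl
        (fun (st : List (List Char) × List Char) (ch : Char) =>
          if ch == ',' || ch == '|' || ch == '/' then
            (st.1 ++ [PySem.Chars.strip st.2], ([] : List Char))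
          else (st.1, st.2 ++ [ch]))
        (([], []) : List (List Char) × List Char)
      let tokens := st.1 ++ [PySem.Chars.strip st.2]
      (tokens.filter (fun t => !t.isEmpty)).map String.ofList

-- ===== PRECONDITION & SPEC =====
def Spec_extract_focus_note_values_py (note : String) (out : List String) : Prop := out = extract_focus_note_values_py_alt note
instance (note : String) (out : List String) : Decidable (Spec_extract_focus_note_values_py note out) := by unfold Spec_extract_focus_note_values_py; infer_instance

-- ===== CLAIM (what is proved, stated in full; the proofs are below) =====
def Claim_equal_extract_focus_note_values_py : Prop := ∀ (note : String), Dom_extract_focus_note_values_py note → Spec_extract_focus_note_values_py note (extract_focus_note_values_py note)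

-- ===== LEMMAS AND PROOFS =====

def pvSplitc (p : Char → Bool) : List Char → List (List Char)
  | [] => [[]]
  | c :: cs => if p c then [] :: pvSplitc p cs else (pvSplitc p cs).modifyHead (c :: ·)

def pvMapLast (f : List Char → List Char) : List (List Char) → List (List Char)
  | [] => []
  | [a] => [f a]
  | a :: b :: t => a :: pvMapLast f (b :: t)

theorem pvSplitc_ne_nil (p : Char → Bool) (cs : List Char) : pvSplitc p cs ≠ [] := by
  induction cs with
  | nil => simp [pvSplitc]
  | cons c cs ih =>
    simp only [pvSplitc]
    split
    · simp
    · cases h : pvSplitc p cs with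
      | nil => exact absurd h ih
      | cons a t => simp [List.modifyHead]

theorem pv_go_spec (s : Char) (fuel : Nat) : ∀ (l : List Char), l.length < fuel → ∀ (cur : List Char) (acc : List (List Char)),
    PySem.Chars.splitOn.go [s] fuel l cur acc
      = acc.reverse ++ ((pvSplitc (· == s) l).modifyHead (cur.reverse ++ ·)) := by
  induction fuel with
  | zero => intro l h; omega
  | succ f ih =>
    intro l h cur acc
    cases l with
    | nil => simp [PySem.Chars.splitOn.go, pvSplitc]
    | cons c rest =>
      rw [PySem.Chars.splitOn.go]
      by_cases hc : c = s
      · have hp : List.isPrefixOf [s] (c :: rest) = true := by simp [List.isPrefixOf, hc]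
        simp only [hp, if_pos, List.length_cons, List.drop_succ_cons, List.length_nil, List.drop_zero]
        rw [ih rest (by simpa using Nat.lt_of_succ_lt_succ h)]
        simp only [pvSplitc, hc]
        cases hsp : pvSplitc (fun x => x == s) rest with
        | nil => exact absurd hsp (pvSplitc_ne_nil _ _)
        | cons a t => simp [List.modifyHead]
      · have hp : List.isPrefixOf [s] (c :: rest) = false := by simp [List.isPrefixOf]; exact fun hh => absurd hh.symm hc
        simp only [hp]
        rw [ih rest (by simpa using Nat.lt_of_succ_lt_succ h) (c :: cur) acc]
        have hpc : ((c == s) : Bool) = false := by simp [hc]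
        simp only [pvSplitc, hpc, if_neg, Bool.false_eq_true, not_false_iff]
        cases hsp : pvSplitc (· == s) rest with
        | nil => exact absurd hsp (pvSplitc_ne_nil _ _)
        | cons a t => simp [List.modifyHead]

theorem pv_splitOn_single (s : Char) (l : List Char) :
    PySem.Chars.splitOn l [s] = pvSplitc (· == s) l := by
  rw [PySem.Chars.splitOn, pv_go_spec s (l.length + 1) l (by omega)]
  cases h : pvSplitc (· == s) l with
  | nil => exact absurd h (pvSplitc_ne_nil _ _)
  | cons a t => simp [List.modifyHead]

theorem pvMapLast_append_singleton (f : List Char → List Char) (l : List (List Char)) (a : List Char) :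
    pvMapLast f (l ++ [a]) = l ++ [f a] := by
  induction l with
  | nil => simp [pvMapLast]
  | cons x l ih =>
    cases l with
    | nil => simp [pvMapLast]
    | cons y t => simpa [pvMapLast] using ih

theorem pvSplitc_snoc (p : Char → Bool) (a : List Char) (c : Char) :
    pvSplitc p (a ++ [c]) =
      if p c then pvSplitc p a ++ [[]] else pvMapLast (· ++ [c]) (pvSplitc p a) := by
  induction a with
  | nil =>
    by_cases hc : p c <;> simp [pvSplitc, hc, pvMapLast, List.modifyHead]
  | cons x a ih =>
    by_cases hx : p x
    · simp only [List.cons_append, pvSplitc, hx, if_pos, ih]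
      by_cases hc : p c
      · simp [hc]
      · simp only [hc, if_neg, Bool.false_eq_true, not_false_iff]
        cases h : pvSplitc p a with
        | nil => exact absurd h (pvSplitc_ne_nil _ _)
        | cons u t => simp [pvMapLast]
    · simp only [List.cons_append, pvSplitc, hx, ih]
      by_cases hc : p c
      · simp only [hc, if_pos]
        cases h : pvSplitc p a with
        | nil => exact absurd h (pvSplitc_ne_nil _ _)
        | cons u t => simp [List.modifyHead]
      · simp only [hc, if_neg, Bool.false_eq_true, not_false_iff]
        cases h : pvSplitc p a with
        | nil => exact absurd h (pvSplitc_ne_nil _ _)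
        | cons u t =>
          cases t with
          | nil => simp [List.modifyHead, pvMapLast]
          | cons v t' => simp [List.modifyHead, pvMapLast]

theorem pvSplitc_reverse (p : Char → Bool) (l : List Char) :
    pvSplitc p l.reverse = ((pvSplitc p l).map List.reverse).reverse := by
  induction l with
  | nil => simp [pvSplitc]
  | cons c cs ih =>
    simp only [List.reverse_cons]
    rw [pvSplitc_snoc, ih]
    by_cases hc : p c
    · simp [pvSplitc, hc]
    · simp only [hc, if_neg, Bool.false_eq_true, not_false_iff, pvSplitc]
      cases h : pvSplitc p cs with
      | nil => exact absurd h (pvSplitc_ne_nil _ _)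
      | cons u t =>
        simp [List.modifyHead, pvMapLast_append_singleton]

theorem pv_strip_cons_space (c : Char) (h : PySem.Chars.isspace c = true) (l : List Char) :
    PySem.Chars.strip (c :: l) = PySem.Chars.strip l := by
  simp [PySem.Chars.strip, PySem.Chars.lstrip, List.dropWhile_cons, h]

theorem pv_rstrip_append_space (c : Char) (h : PySem.Chars.isspace c = true) (l : List Char) :
    PySem.Chars.rstrip (l ++ [c]) = PySem.Chars.rstrip l := by
  simp [PySem.Chars.rstrip, List.dropWhile_cons, h]

theorem pv_strip_append_space (c : Char) (h : PySem.Chars.isspace c = true) (l : List Char) :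
    PySem.Chars.strip (l ++ [c]) = PySem.Chars.strip l := by
  simp only [PySem.Chars.strip, PySem.Chars.lstrip, List.dropWhile_append]
  split
  · next h2 => rw [List.isEmpty_iff.mp h2]; simp [h, PySem.Chars.rstrip]
  · exact pv_rstrip_append_space c h _

theorem pv_Lgen (q : Char → Bool) (hq : ∀ c, q c = true → PySem.Chars.isspace c = false)
    (f : List Char → List Char) (hf : ∀ c l, PySem.Chars.isspace c = true → f (c :: l) = f l) :
    ∀ u : List Char,
      (pvSplitc q (List.dropWhile PySem.Chars.isspace u)).map f = (pvSplitc q u).map f := by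
  intro u
  induction u with
  | nil => rfl
  | cons c u ih =>
    by_cases hs : PySem.Chars.isspace c
    · have hqc : q c = false := by
        by_contra hcontra
        have := hq c (by revert hcontra; cases q c <;> simp)
        rw [this] at hs; exact absurd hs (by simp)
      rw [List.dropWhile_cons_of_pos hs, ih]
      simp only [pvSplitc, hqc, Bool.false_eq_true, if_neg, not_false_iff]
      cases h : pvSplitc q u with
      | nil => exact absurd h (pvSplitc_ne_nil _ _)
      | cons a t => simp [List.modifyHead, hf c a hs]
    · rw [List.dropWhile_cons_of_neg hs]

theorem pv_L' (q : Char → Bool) (hq : ∀ c, q c = true → PySem.Chars.isspace c = false)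
    (w : List Char) :
    (pvSplitc q (PySem.Chars.rstrip w)).map PySem.Chars.strip
      = (pvSplitc q w).map PySem.Chars.strip := by
  have hrs : PySem.Chars.rstrip w = (List.dropWhile PySem.Chars.isspace w.reverse).reverse := rfl
  rw [hrs, pvSplitc_reverse, List.map_reverse, List.map_map]
  have hf : ∀ c l, PySem.Chars.isspace c = true →
      (PySem.Chars.strip ∘ List.reverse) (c :: l) = (PySem.Chars.strip ∘ List.reverse) l := by
    intro c l hc
    simp [Function.comp, pv_strip_append_space c hc]
  rw [pv_Lgen q hq _ hf w.reverse, pvSplitc_reverse, List.map_reverse, List.map_map]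
  simp [Function.comp]

theorem pv_K (q : Char → Bool) (hq : ∀ c, q c = true → PySem.Chars.isspace c = false)
    (x : List Char) :
    (pvSplitc q (PySem.Chars.strip x)).map PySem.Chars.strip
      = (pvSplitc q x).map PySem.Chars.strip := by
  have h1 : PySem.Chars.strip x = PySem.Chars.rstrip (PySem.Chars.lstrip x) := rfl
  rw [h1, pv_L' q hq]
  have h2 : PySem.Chars.lstrip x = List.dropWhile PySem.Chars.isspace x := rfl
  rw [h2]
  exact pv_Lgen q hq PySem.Chars.strip (fun c l hc => pv_strip_cons_space c hc l) x

theorem pv_flatMap_splitc (p q : Char → Bool) (cs : List Char) :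
    (pvSplitc p cs).flatMap (pvSplitc q) = pvSplitc (fun c => p c || q c) cs := by
  induction cs with
  | nil => simp [pvSplitc]
  | cons c cs ih =>
    by_cases hp : p c
    · simp only [pvSplitc, hp, Bool.true_or, if_pos, List.flatMap_cons, ih]
      simp [pvSplitc]
    · by_cases hqc : q c
      · simp only [pvSplitc, hp, hqc, Bool.false_eq_true, if_neg, not_false_iff,
          Bool.false_or, if_pos]
        cases h : pvSplitc p cs with
        | nil => exact absurd h (pvSplitc_ne_nil _ _)
        | cons a t =>
          rw [h] at ih
          simp only [List.modifyHead, List.flatMap_cons, pvSplitc, hqc, if_pos]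
          simp only [List.flatMap_cons] at ih
          simp [ih]
      · simp only [pvSplitc, hp, hqc, Bool.false_eq_true, if_neg, not_false_iff, Bool.or_self,
          Bool.false_or]
        cases h : pvSplitc p cs with
        | nil => exact absurd h (pvSplitc_ne_nil _ _)
        | cons a t =>
          rw [h] at ih
          simp only [List.modifyHead, List.flatMap_cons, pvSplitc, hqc, Bool.false_eq_true,
            if_neg, not_false_iff]
          simp only [List.flatMap_cons] at ih
          cases ha : pvSplitc q a with
          | nil => exact absurd ha (pvSplitc_ne_nil _ _)
          | cons b u =>
            rw [ha] at ih
            rw [← ih]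
            simp

theorem pv_bfold (cs : List Char) : ∀ (T : List (List Char)) (cur : List Char),
    ((cs.foldl
        (fun (st : List (List Char) × List Char) (ch : Char) =>
          if ch == ',' || ch == '|' || ch == '/' then
            (st.1 ++ [PySem.Chars.strip st.2], ([] : List Char))
          else (st.1, st.2 ++ [ch])) (T, cur)).1
      ++ [PySem.Chars.strip (cs.foldl
        (fun (st : List (List Char) × List Char) (ch : Char) =>
          if ch == ',' || ch == '|' || ch == '/' then
            (st.1 ++ [PySem.Chars.strip st.2], ([] : List Char))
          else (st.1, st.2 ++ [ch])) (T, cur)).2])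
    = T ++ ((pvSplitc (fun ch => ch == ',' || ch == '|' || ch == '/') cs).modifyHead
        (cur ++ ·)).map PySem.Chars.strip := by
  induction cs with
  | nil => intro T cur; simp [pvSplitc, List.modifyHead]
  | cons ch cs ih =>
    intro T cur
    by_cases hc : (ch == ',' || ch == '|' || ch == '/') = true
    · simp only [List.foldl_cons, hc, if_pos, pvSplitc]
      rw [ih]
      cases h : pvSplitc (fun ch => ch == ',' || ch == '|' || ch == '/') cs with
      | nil => exact absurd h (pvSplitc_ne_nil _ _)
      | cons a t => simp [List.modifyHead]
    · simp only [List.foldl_cons, hc, if_neg, not_false_iff, pvSplitc, Bool.false_eq_true]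
      rw [ih]
      cases h : pvSplitc (fun ch => ch == ',' || ch == '|' || ch == '/') cs with
      | nil => exact absurd h (pvSplitc_ne_nil _ _)
      | cons a t => simp [List.modifyHead]

theorem pv_step (q : Char → Bool) (hq : ∀ c, q c = true → PySem.Chars.isspace c = false)
    (X : List (List Char)) :
    (X.map PySem.Chars.strip).flatMap (fun i => (pvSplitc q i).map PySem.Chars.strip)
      = (X.flatMap (pvSplitc q)).map PySem.Chars.strip := by
  rw [List.flatMap_map, List.map_flatMap]
  exact congrArg (fun f => X.flatMap f) (funext (pv_K q hq))

theorem pv_achain (v : List Char) :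
    ([(",".toList), ("|".toList), ("/".toList)].foldl
      (fun (raw_values : List (List Char)) (separator : List Char) =>
        raw_values.foldl
          (fun (exploded : List (List Char)) (item : List Char) =>
            exploded ++ (PySem.Chars.splitOn item separator).map PySem.Chars.strip)
          [])
      [v])
    = (pvSplitc (fun ch => ch == ',' || ch == '|' || ch == '/') v).map PySem.Chars.strip := by
  have hcom : ",".toList = [','] ∧ "|".toList = ['|'] ∧ "/".toList = ['/'] := by decide
  obtain ⟨h1, h2, h3⟩ := hcom
  simp only [List.foldl_cons, List.foldl_nil, h1, h2, h3,
    PySem.List.foldl_append_eq_flatMap, List.nil_append]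
  simp only [pv_splitOn_single]
  have hq2 : ∀ c : Char, (c == '|') = true → PySem.Chars.isspace c = false := by
    intro c hcq; rw [eq_of_beq hcq]; decide
  have hq3 : ∀ c : Char, (c == '/') = true → PySem.Chars.isspace c = false := by
    intro c hcq; rw [eq_of_beq hcq]; decide
  rw [List.flatMap_singleton, pv_step _ hq2, pv_flatMap_splitc, pv_step _ hq3,
    pv_flatMap_splitc]

theorem pv_main (note : String) :
    extract_focus_note_values_py note = extract_focus_note_values_py_alt note := by
  unfold extract_focus_note_values_py extract_focus_note_values_py_alt
  by_cases hc : PySem.Chars.isIn "focus=".toList note.toList = false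
  · simp only [hc, if_pos]
  · simp only [hc, if_neg, not_false_iff]
    set v := PySem.Chars.strip
      (PySem.List.pyGetD
        (PySem.Chars.splitOnMax
          (PySem.List.pyGetD (PySem.Chars.splitOnMax note.toList "focus=".toList 1) 1 [])
          ";".toList 1) 0 []) with hv
    by_cases he : v.isEmpty
    · simp only [he, if_pos]
    · simp only [he, if_neg, not_false_iff]
      rw [pv_achain v, pv_bfold v [] []]
      cases h : pvSplitc (fun ch => ch == ',' || ch == '|' || ch == '/') v with
      | nil => exact absurd h (pvSplitc_ne_nil _ _)
      | cons a t => simp [List.modifyHead]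

-- ===== VERDICT (by name: the statement is the Claim_ definition above) =====
theorem extract_focus_note_values_py_spec : Claim_equal_extract_focus_note_values_py := by
  intro note _
  unfold Spec_extract_focus_note_values_py
  exact pv_main note
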